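-- pv_equiv track=rewrite | github.com/vishrutkmr7/DailyPracticeProblemsDIP | 2022/08 August/db08222022.py | can_form_passage
-- ===== SOURCE A (Python) =====
-- def can_form_passage(passage, text):
--     """
--     :param passage: string
--     :param text: string
--     :return: boolean
--     """
--     if len(passage) > len(text):
--         return False
--     for i in enumerate(passage):
--         if passage[i[0]] in text:
--             text = text.replace(passage[i[0]], "", 1)
--         else:
--             return False
--     return True
-- ===== SOURCE B (Python) =====
-- def can_form_passage(passage, text):
--     s = sorted(passage)
--     t = sorted(text)
--     n = len(t)
--     j = 0
--     for c in s:
--         while j < n and t[j] < c: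
--             j += 1
--         if j == n or t[j] != c:
--             return False
--         j += 1
--     return True
-- ===== Notes on version B (the rewrite author's own statement) =====
-- stated objective: faster
-- what changed: Replaces the per-character membership test plus replace(c,'',1) rescans of the text (quadratic) with a single merge pass over both inputs sorted, consuming matching characters with two indices.
import Mathlib
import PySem

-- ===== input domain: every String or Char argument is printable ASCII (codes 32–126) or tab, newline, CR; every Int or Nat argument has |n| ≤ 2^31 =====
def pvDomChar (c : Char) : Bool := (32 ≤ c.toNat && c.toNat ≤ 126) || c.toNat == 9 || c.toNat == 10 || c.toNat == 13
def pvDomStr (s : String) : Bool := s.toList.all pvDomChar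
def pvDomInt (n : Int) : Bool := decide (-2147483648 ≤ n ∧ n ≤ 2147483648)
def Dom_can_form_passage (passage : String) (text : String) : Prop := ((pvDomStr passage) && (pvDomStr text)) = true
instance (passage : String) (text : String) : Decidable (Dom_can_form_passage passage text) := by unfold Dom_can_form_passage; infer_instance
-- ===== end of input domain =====

-- B sorts both strings once and checks containment by a single two-pointer merge pass,
-- instead of A's per-character membership test plus replace(c, "", 1) rescans of the text.

-- ===== PORT A =====
-- text.replace(c, "", 1) for a single character c: remove the first occurrence of c.
-- Hand port (PySem.Str.replace has no count argument); exact for old = single char, new = "", count = 1.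
def pvReplace1 : List Char → Char → List Char
  | [], _ => []
  | x :: xs, c => if x = c then xs else x :: pvReplace1 xs c

-- the 'for i in enumerate(passage)' loop; pairs are list(enumerate(passage)), text is the loop state
def pvALoop (p : List Char) : List (Int × Char) → List Char → Bool
  | [], _ => true
  | (idx, _) :: rest, t =>
    match PySem.List.pyGet? p idx with
    | none => false   -- unreachable: enumerate yields in-range indices
    | some c => if PySem.Chars.isIn [c] t then pvALoop p rest (pvReplace1 t c) else false

def can_form_passage (passage : String) (text : String) : Bool :=
  if PySem.Str.len passage > PySem.Str.len text then false
  else pvALoop passage.toList (PySem.List.enumerate passage.toList 0) text.toList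

-- ===== PORT B =====
-- the 'for c in s' loop with index j into t: skip smaller chars, consume a match, else False
def pvBMerge : List Char → List Char → Bool
  | [], _ => true
  | _ :: _, [] => false
  | c :: s, d :: t =>
    if d < c then pvBMerge (c :: s) t
    else if d = c then pvBMerge s t
    else false
  termination_by s t => s.length + t.length

def can_form_passage_alt (passage : String) (text : String) : Bool :=
  pvBMerge (PySem.List.sorted passage.toList (fun x => x) false)
           (PySem.List.sorted text.toList (fun x => x) false)

-- ===== PRECONDITION & SPEC =====
def Spec_can_form_passage (passage : String) (text : String) (out : Bool) : Prop := out = can_form_passage_alt passage text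
instance (passage : String) (text : String) (out : Bool) : Decidable (Spec_can_form_passage passage text out) := by unfold Spec_can_form_passage; infer_instance

-- ===== CLAIM (what is proved, stated in full; the proofs are below) =====
def Claim_equal_can_form_passage : Prop := ∀ (passage : String) (text : String), Dom_can_form_passage passage text → Spec_can_form_passage passage text (can_form_passage passage text)

-- ===== LEMMAS AND PROOFS =====

lemma pvReplace1_eq_erase (t : List Char) (c : Char) : pvReplace1 t c = t.erase c := by
  induction t with
  | nil => rfl
  | cons x xs ih =>
    by_cases h : x = c
    · simp [pvReplace1, h]
    · simp [pvReplace1, h, ih]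

lemma isIn_singleton (c : Char) (t : List Char) : PySem.Chars.isIn [c] t = true ↔ c ∈ t := by
  rw [PySem.Chars.isIn_iff_infix]
  constructor
  · intro h; exact (List.singleton_sublist.mp h.sublist)
  · intro h
    obtain ⟨u, v, rfl⟩ := List.append_of_mem h
    exact ⟨u, v, by simp⟩

-- A's loop with the index bookkeeping stripped: it consumes the enumerated characters in order
def pvSimpleA : List Char → List Char → Bool
  | [], _ => true
  | c :: rest, t => if c ∈ t then pvSimpleA rest (t.erase c) else false

lemma pvALoop_eq_simple (p : List Char) (pairs : List (Int × Char)) (t : List Char)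
    (h : ∀ pr ∈ pairs, PySem.List.pyGet? p pr.1 = some pr.2) :
    pvALoop p pairs t = pvSimpleA (pairs.map (·.2)) t := by
  induction pairs generalizing t with
  | nil => rfl
  | cons pr rest ih =>
    obtain ⟨idx, c⟩ := pr
    have hget := h (idx, c) (by simp)
    simp only [pvALoop, hget, pvSimpleA, List.map_cons]
    by_cases hc : c ∈ t
    · rw [if_pos ((isIn_singleton c t).mpr hc), if_pos hc, pvReplace1_eq_erase]
      exact ih _ (fun pr hpr => h pr (by simp [hpr]))
    · rw [if_neg (by simpa [isIn_singleton]), if_neg hc]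

lemma enumerate_pyGet? (p : List Char) (pr : Int × Char) (h : pr ∈ PySem.List.enumerate p 0) :
    PySem.List.pyGet? p pr.1 = some pr.2 := by
  rw [PySem.List.mem_enumerate_iff] at h
  obtain ⟨k, hk, rfl⟩ := h
  simp [hk]

lemma count_le_succ_cons (x d : Char) (t : List Char) :
    List.count x t ≤ List.count x (d :: t) := by
  by_cases hxd : x = d
  · subst hxd; simp
  · rw [List.count_cons_of_ne (fun h => hxd h.symm)]

lemma pvSimpleA_iff (l t : List Char) :
    pvSimpleA l t = true ↔ ∀ c, l.count c ≤ t.count c := by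
  induction l generalizing t with
  | nil => simp [pvSimpleA]
  | cons c rest ih =>
    by_cases hc : c ∈ t
    · simp only [pvSimpleA, if_pos hc, ih]
      have hct : 1 ≤ t.count c := List.one_le_count_iff.mpr hc
      constructor
      · intro h x
        have hx := h x
        by_cases hxc : x = c
        · subst hxc
          rw [List.count_cons_self]
          rw [List.count_erase_self] at hx
          omega
        · rw [List.count_cons_of_ne (fun h' => hxc h'.symm)]
          rwa [List.count_erase_of_ne hxc] at hx
      · intro h x
        have hx := h x
        by_cases hxc : x = c
        · subst hxc
          rw [List.count_erase_self]
          rw [List.count_cons_self] at hx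
          omega
        · rw [List.count_erase_of_ne hxc]
          rwa [List.count_cons_of_ne (fun h' => hxc h'.symm)] at hx
    · simp only [pvSimpleA, if_neg hc]
      constructor
      · intro h; exact absurd h (by simp)
      · intro h
        have := h c
        simp [List.count_eq_zero_of_not_mem hc] at this

lemma pvBMerge_iff (s t : List Char) :
    s.Pairwise (· ≤ ·) → t.Pairwise (· ≤ ·) →
      (pvBMerge s t = true ↔ ∀ c, s.count c ≤ t.count c) := by
  induction s, t using pvBMerge.induct with
  | case1 t =>
    intro _ _
    simp [pvBMerge]
  | case2 c s =>
    intro _ _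
    simp only [pvBMerge]
    constructor
    · intro h; exact absurd h (by simp)
    · intro h
      have := h c
      simp at this
  | case3 c s d t hlt ih =>
    intro hs ht
    rw [pvBMerge, if_pos hlt, ih hs ht.of_cons]
    constructor
    · intro h x
      exact le_trans (h x) (count_le_succ_cons x d t)
    · intro h x
      have hx := h x
      by_cases hxd : x = d
      · subst hxd
        -- every element of c :: s is ≥ c > x, so x does not occur on the left
        have h0 : (c :: s).count x = 0 := by
          apply List.count_eq_zero_of_not_mem
          intro hmem
          rcases List.mem_cons.mp hmem with h1 | h1
          · exact absurd hlt (by simp [h1])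
          · have hcle : c ≤ x := List.rel_of_pairwise_cons hs h1
            exact absurd (lt_of_lt_of_le hlt hcle) (lt_irrefl x)
        simp [h0]
      · rwa [List.count_cons_of_ne (fun h' => hxd h'.symm)] at hx
  | case4 s d t hnlt ih =>
    intro hs ht
    rw [pvBMerge, if_neg hnlt, if_pos rfl, ih hs.of_cons ht.of_cons]
    constructor
    · intro h x
      by_cases hxd : x = d
      · subst hxd
        rw [List.count_cons_self, List.count_cons_self]
        exact Nat.add_le_add_right (h x) 1
      · rw [List.count_cons_of_ne (fun h' => hxd h'.symm),
            List.count_cons_of_ne (fun h' => hxd h'.symm)]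
        exact h x
    · intro h x
      have hx := h x
      by_cases hxd : x = d
      · subst hxd
        rw [List.count_cons_self, List.count_cons_self] at hx
        omega
      · rwa [List.count_cons_of_ne (fun h' => hxd h'.symm),
             List.count_cons_of_ne (fun h' => hxd h'.symm)] at hx
  | case5 c s d t hnlt hne =>
    intro hs ht
    have hcd : c < d := lt_of_le_of_ne (not_lt.mp hnlt) (fun h => hne h.symm)
    rw [pvBMerge, if_neg hnlt, if_neg hne]
    constructor
    · intro h; exact absurd h (by simp)
    · intro h
      have hx := h c
      have hc0 : (d :: t).count c = 0 := by
        apply List.count_eq_zero_of_not_mem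
        intro hmem
        rcases List.mem_cons.mp hmem with h1 | h1
        · exact absurd hcd (by simp [h1])
        · have hdle : d ≤ c := List.rel_of_pairwise_cons ht h1
          exact absurd (lt_of_lt_of_le hcd hdle) (lt_irrefl c)
      rw [hc0] at hx
      simp at hx

lemma sorted_sorted (l : List Char) :
    (PySem.List.sorted l (fun x => x) false).Pairwise (· ≤ ·) :=
  PySem.List.sorted_pairwise l (fun x => x)

lemma alt_iff (passage text : String) :
    can_form_passage_alt passage text = true ↔
      ∀ c, passage.toList.count c ≤ text.toList.count c := by
  unfold can_form_passage_alt
  rw [pvBMerge_iff _ _ (sorted_sorted _) (sorted_sorted _)]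
  constructor
  · intro h c
    have := h c
    rwa [(PySem.List.sorted_perm passage.toList (fun x => x) false).count_eq,
         (PySem.List.sorted_perm text.toList (fun x => x) false).count_eq] at this
  · intro h c
    rw [(PySem.List.sorted_perm passage.toList (fun x => x) false).count_eq,
        (PySem.List.sorted_perm text.toList (fun x => x) false).count_eq]
    exact h c

lemma counts_length_le (p t : List Char) (h : ∀ c, p.count c ≤ t.count c) :
    p.length ≤ t.length := by
  have : p.Subperm t := List.subperm_ext_iff.mpr (fun x _ => h x)
  exact this.length_le

lemma a_iff (passage text : String) :
    can_form_passage passage text = true ↔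
      ∀ c, passage.toList.count c ≤ text.toList.count c := by
  unfold can_form_passage
  by_cases hlen : PySem.Str.len passage > PySem.Str.len text
  · rw [if_pos hlen]
    simp only [Bool.false_eq_true, false_iff]
    intro h
    have := counts_length_le _ _ h
    rw [PySem.Str.len_eq, PySem.Str.len_eq] at hlen
    omega
  · rw [if_neg hlen,
        pvALoop_eq_simple _ _ _ (fun pr hpr => enumerate_pyGet? _ pr hpr),
        PySem.List.map_snd_enumerate, pvSimpleA_iff]

-- ===== VERDICT (by name: the statement is the Claim_ definition above) =====
theorem can_form_passage_spec : Claim_equal_can_form_passage := by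
  intro passage text _
  unfold Spec_can_form_passage
  rw [Bool.eq_iff_iff, a_iff, alt_iff]
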